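-- pv_equiv track=rewrite | github.com/kazuhiko1979/edabit | recursion/リスト_最大文字列.py | maxAscilString
-- ===== SOURCE A (Python) =====
-- def maxAscilString(stringList):
--     # 最大値とそのインデックスを格納、0番目の文字列を初期値に設定
--     maxValue = sumOfAscii(stringList[0])
--     maxIndex = 0
--
--     # 各文字列の文字コードの和を確認し、最大値を見つけます。
--     for i, s in enumerate(stringList):
--         # 文字コードの和を取得
--         curr = sumOfAscii(s)
--         # maxValueを超えたら更新します
--         if maxValue < curr:
--             maxValue = curr
--             maxIndex = i
--     return maxIndex
--
-- def sumOfAscii(string):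
--     # 文字列を小文字に変換し、各文字の文字コードをtotalに足します。
--     total = 0
--     for i in string.lower():
--         total += ord(i)
--     return total
-- ===== SOURCE B (Python) =====
-- def maxAscilString(stringList):
--     # Build the table of ascii sums once, then locate the first maximum.
--     sums = [sumOfAscii(s) for s in stringList]
--     return sums.index(max(sums))
--
-- def sumOfAscii(string):
--     return sum(ord(c) for c in string.lower())
-- ===== Notes on version B (the rewrite author's own statement) =====
-- stated objective: idiomatic
-- what changed: Replaces the running-max scan with explicit index bookkeeping by a table build (list of ascii sums) followed by sums.index(max(sums)) for the first argmax.
import Mathlib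
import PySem

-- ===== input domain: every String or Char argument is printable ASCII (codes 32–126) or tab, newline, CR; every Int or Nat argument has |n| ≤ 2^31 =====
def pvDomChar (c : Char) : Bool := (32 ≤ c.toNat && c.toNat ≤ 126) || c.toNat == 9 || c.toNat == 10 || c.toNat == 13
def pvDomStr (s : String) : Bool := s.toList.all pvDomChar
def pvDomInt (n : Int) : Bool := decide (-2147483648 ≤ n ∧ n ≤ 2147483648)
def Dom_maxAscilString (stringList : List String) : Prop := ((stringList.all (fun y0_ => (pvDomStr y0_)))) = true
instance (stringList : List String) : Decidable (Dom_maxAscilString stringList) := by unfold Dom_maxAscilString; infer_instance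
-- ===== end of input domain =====

-- B does not mutate anything; the equivalence is about the return value.
-- B builds the table of ascii sums and takes the first index of its maximum; same cost, plainer shape.

-- ===== PORT A =====
-- shared helper: sumOfAscii, used verbatim by both Pythons
def sumOfAscii (s : String) : Int :=
  (PySem.Str.lower s).toList.foldl (fun total c => total + (c.toNat : Int)) 0

def maxAscilString (stringList : List String) : Int :=
  match stringList with
  | [] => 0  -- Python A raises IndexError here (stringList[0]); excluded by Pre_
  | s0 :: _ =>
    let st := (PySem.List.enumerate stringList 0).foldl
      (fun (st : Int × Int) is =>
        let curr := sumOfAscii is.2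
        if st.1 < curr then (curr, is.1) else st)
      (sumOfAscii s0, 0)
    st.2

-- ===== PORT B =====
def maxAscilString_alt (stringList : List String) : Int :=
  let sums := stringList.map sumOfAscii
  match PySem.List.max? sums (fun x => x) with
  | none => 0  -- Python B raises ValueError here (max of empty); excluded by Pre_
  | some m => ((PySem.List.index? sums m).getD 0 : Nat)

-- ===== PRECONDITION & SPEC =====
-- Pre_ excludes exactly the empty list, on which A raises IndexError.
def Pre_maxAscilString (stringList : List String) : Prop := stringList ≠ []
instance (stringList : List String) : Decidable (Pre_maxAscilString stringList) := by unfold Pre_maxAscilString; infer_instance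
def pvWitness_maxAscilString : List String := (["ab", "Z!"])

def Spec_maxAscilString (stringList : List String) (out : Int) : Prop := out = maxAscilString_alt stringList
instance (stringList : List String) (out : Int) : Decidable (Spec_maxAscilString stringList out) := by unfold Spec_maxAscilString; infer_instance

-- ===== CLAIM (what is proved, stated in full; the proofs are below) =====
def Claim_equal_maxAscilString : Prop := ∀ (stringList : List String), Dom_maxAscilString stringList → Pre_maxAscilString stringList → Spec_maxAscilString stringList (maxAscilString stringList)

-- ===== LEMMAS AND PROOFS =====

-- A's loop as a recursion on the list of sums: state (v, i), counter k.
def scanA : List Int → Int → Int → Int → Int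
  | [], _, i, _ => i
  | x :: u, v, i, k => if v < x then scanA u x k (k + 1) else scanA u v i (k + 1)

theorem foldl_eq_scanA (l : List String) (v i k : Int) :
    ((PySem.List.enumerate l k).foldl
      (fun (st : Int × Int) is =>
        let curr := sumOfAscii is.2
        if st.1 < curr then (curr, is.1) else st)
      (v, i)).2 = scanA (l.map sumOfAscii) v i k := by
  induction l generalizing v i k with
  | nil => simp [PySem.List.enumerate, scanA]
  | cons x t ih =>
    rw [PySem.List.enumerate_cons]
    simp only [List.foldl_cons, List.map_cons, scanA]
    split <;> simp_all

theorem foldl_max_eq_self (t : List Int) (b : Int) (h : ∀ y ∈ t, y ≤ b) :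
    t.foldl max b = b := by
  induction t with
  | nil => rfl
  | cons a s ihs =>
    simp only [List.foldl_cons]
    rw [max_eq_left (h a List.mem_cons_self)]
    exact ihs (fun y hy => h y (List.mem_cons_of_mem _ hy))

theorem idxOf?_of_mem (l : List Int) (a : Int) (h : a ∈ l) :
    List.idxOf? a l = some (List.idxOf a l) := by
  induction l with
  | nil => cases h
  | cons x t ih =>
    by_cases hx : x = a
    · subst hx; simp [List.idxOf?_cons, List.idxOf_cons_self]
    · have ha : a ∈ t := by
        rcases List.mem_cons.1 h with h' | h'
        · exact absurd h'.symm hx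
        · exact h'
      rw [List.idxOf_cons_ne _ hx]
      simp only [List.idxOf?_cons, beq_iff_eq]
      rw [if_neg hx, ih ha]
      rfl

theorem foldl_max_mem (u : List Int) (b : Int) : u.foldl max b = b ∨ u.foldl max b ∈ u := by
  induction u generalizing b with
  | nil => left; rfl
  | cons a s ih =>
    simp only [List.foldl_cons]
    rcases ih (max b a) with h | h
    · rcases max_choice b a with he | he
      · left; rw [he] at h ⊢; exact h
      · right; rw [he] at h ⊢; rw [h]; exact List.mem_cons_self
    · right; exact List.mem_cons_of_mem _ h

theorem scanA_char (u : List Int) (v i k : Int) :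
    scanA u v i k =
      if ∀ x ∈ u, x ≤ v then i else k + (u.idxOf (u.foldl max v) : Int) := by
  induction u generalizing v i k with
  | nil => simp [scanA]
  | cons x t ih =>
    have hnotall : v < x → ¬ (∀ y ∈ x :: t, y ≤ v) := by
      intro hvx hc; exact absurd (hc x List.mem_cons_self) (not_le.mpr hvx)
    simp only [scanA, List.foldl_cons]
    by_cases hvx : v < x
    · rw [if_pos hvx, if_neg (hnotall hvx), max_eq_right hvx.le, ih]
      by_cases hall : ∀ y ∈ t, y ≤ x
      · rw [if_pos hall, foldl_max_eq_self t x hall, List.idxOf_cons_self]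
        simp
      · rw [if_neg hall]
        have hxM : x < t.foldl max x := by
          push Not at hall
          obtain ⟨y, hy, hxy⟩ := hall
          have := (PySem.List.le_foldl_max t x).2 y hy
          omega
        rw [List.idxOf_cons_ne _ (by omega)]
        push_cast [Nat.succ_eq_add_one]
        ring
    · have hxv : x ≤ v := not_lt.mp hvx
      rw [if_neg hvx, max_eq_left hxv, ih]
      by_cases hall : ∀ y ∈ t, y ≤ v
      · rw [if_pos hall, if_pos]
        intro y hy
        rcases List.mem_cons.1 hy with h | h
        · omega
        · exact hall y h
      · rw [if_neg hall, if_neg]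
        · have hxM : x < t.foldl max v := by
            push Not at hall
            obtain ⟨y, hy, hvy⟩ := hall
            have := (PySem.List.le_foldl_max t v).2 y hy
            omega
          rw [List.idxOf_cons_ne _ (by omega)]
          push_cast [Nat.succ_eq_add_one]
          ring
        · push Not at hall ⊢
          obtain ⟨y, hy, hvy⟩ := hall
          exact ⟨y, List.mem_cons_of_mem _ hy, hvy⟩

-- ===== VERDICT (by name: the statement is the Claim_ definition above) =====
theorem maxAscilString_spec : Claim_equal_maxAscilString := by
  intro stringList _ hpre
  unfold Spec_maxAscilString maxAscilString maxAscilString_alt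
  match stringList, hpre with
  | s0 :: t, _ =>
    simp only [List.map_cons, PySem.List.max?_id_cons]
    rw [foldl_eq_scanA]
    set v0 := sumOfAscii s0 with hv0
    set u := t.map sumOfAscii with hu
    set M := u.foldl max v0 with hM
    have hMmem : M ∈ v0 :: u := by
      rcases foldl_max_mem u v0 with h | h
      · rw [hM, h]; exact List.mem_cons_self
      · exact List.mem_cons_of_mem _ h
    rw [List.map_cons, PySem.List.index?_eq_idxOf?, idxOf?_of_mem _ _ hMmem]
    simp only [Option.getD_some]
    rw [scanA_char]
    by_cases hall : ∀ x ∈ v0 :: u, x ≤ v0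
    · rw [if_pos hall]
      have : M = v0 := by
        rw [hM, foldl_max_eq_self u v0 (fun y hy => hall y (List.mem_cons_of_mem _ hy))]
      rw [this, List.idxOf_cons_self]
      simp
    · rw [if_neg hall]
      have hfold : (v0 :: u).foldl max v0 = M := by
        simp [hM, max_self]
      rw [hfold]
      norm_num
      rw [← hv0, ← hu]
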